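-- pv_equiv track=rewrite | github.com/ASSERT-KTH/Mokav | experiments/pynguin/c4b/return-lst/generated_tests/src_268/4/src_268.py | func
-- ===== SOURCE A (Python) =====
-- def func(*args):
-- 	ret_values = []
--
-- 	s = args[0]
-- 	res = s.count('VK')
-- 	s = s.split('VK')
-- 	res += (sum([(('VV' in x) or ('KK' in x)) for x in s]) > 0)
-- 	ret_values.append(res)
--
-- 	return ret_values
-- ===== SOURCE B (Python) =====
-- def func(*args):
--     s = args[0]
--     res = 0
--     flag = False
--     prev = None
--     i = 0
--     n = len(s)
--     while i < n:
--         if i + 1 < n and s[i] == 'V' and s[i + 1] == 'K':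
--             res += 1
--             i += 2
--             prev = None  # the consumed 'VK' splits segments; no pair across it
--         else:
--             c = s[i]
--             if prev is not None and prev == c and (c == 'V' or c == 'K'):
--                 flag = True
--             prev = c
--             i += 1
--     return [res + (1 if flag else 0)]
-- ===== Notes on version B (the rewrite author's own statement) =====
-- stated objective: alternative
-- what changed: Replaces count('VK') + split('VK') + per-segment 'VV'/'KK' substring scans by a single left-to-right pass that consumes 'VK' pairs greedily and tracks a previous-character register (reset at each consumed 'VK') to detect an adjacent VV/KK pair within a segment.
import Mathlib
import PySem

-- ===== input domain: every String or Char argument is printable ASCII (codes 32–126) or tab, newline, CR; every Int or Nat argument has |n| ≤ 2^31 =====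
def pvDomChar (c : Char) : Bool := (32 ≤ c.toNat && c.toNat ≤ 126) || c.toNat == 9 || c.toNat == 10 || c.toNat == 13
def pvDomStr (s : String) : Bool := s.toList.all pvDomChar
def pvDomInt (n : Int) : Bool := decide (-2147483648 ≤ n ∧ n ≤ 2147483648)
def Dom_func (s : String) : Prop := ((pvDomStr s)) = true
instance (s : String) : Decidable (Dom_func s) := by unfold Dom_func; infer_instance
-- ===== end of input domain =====

-- B replaces A's count + split + per-segment substring scan by one left-to-right pass
-- tracking a previous-character register reset at each consumed 'VK' (objective: alternative decomposition).

-- ===== PORT A =====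
-- literal port: res = s.count('VK'); parts = s.split('VK'); res += sum([('VV' in x) or ('KK' in x) for x in parts]) > 0
def func (s : String) : List Int :=
  let res : Int := (PySem.Str.count s "VK" : Int)
  let parts : List String := (PySem.Str.split? s "VK").getD []   -- separator "VK" ≠ "", so split? is always `some`
  let res := res +
    (if ((parts.map (fun x =>
          if (PySem.Str.isIn "VV" x || PySem.Str.isIn "KK" x) then (1 : Int) else 0)).sum > 0)
     then 1 else 0)
  [res]

-- ===== PORT B =====
-- the while loop of Source B: state (prev, res, flag), consuming two chars on a 'VK' match (prev reset), else one
def funcAltGo (cs : List Char) (prev : Option Char) (res : Int) (flag : Bool) : Int :=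
  match cs with
  | 'V' :: 'K' :: rest => funcAltGo rest none (res + 1) flag
  | c :: rest => funcAltGo rest (some c) res (flag || (prev == some c && (c == 'V' || c == 'K')))
  | [] => res + (if flag then 1 else 0)

def func_alt (s : String) : List Int := [funcAltGo s.toList none 0 false]

-- ===== PRECONDITION & SPEC =====
def Spec_func (s : String) (out : List Int) : Prop := out = func_alt s
instance (s : String) (out : List Int) : Decidable (Spec_func s out) := by unfold Spec_func; infer_instance

-- ===== CLAIM (what is proved, stated in full; the proofs are below) =====
def Claim_equal_func : Prop := ∀ (s : String), Dom_func s → Spec_func s (func s)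

-- ===== LEMMAS AND PROOFS =====

-- greedy count of non-overlapping "VK"
def pvCnt : List Char → Nat
  | 'V' :: 'K' :: r => pvCnt r + 1
  | _ :: r => pvCnt r
  | [] => 0

-- split on "VK": (first segment, remaining segments)
def pvSp : List Char → List Char × List (List Char)
  | 'V' :: 'K' :: r => ([], (pvSp r).1 :: (pvSp r).2)
  | c :: r => (c :: (pvSp r).1, (pvSp r).2)
  | [] => ([], [])

-- a segment contains an adjacent equal pair of 'V's or 'K's
def pvSeg : List Char → Bool
  | a :: b :: r => (a == b && (a == 'V' || a == 'K')) || pvSeg (b :: r)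
  | _ => false

-- B's flag as a function of the remaining input and the prev register
def pvHp : List Char → Option Char → Bool
  | 'V' :: 'K' :: r, _ => pvHp r none
  | c :: r, prev => (prev == some c && (c == 'V' || c == 'K')) || pvHp r (some c)
  | [], _ => false

theorem funcAltGo_eq (cs : List Char) (prev : Option Char) (res : Int) (flag : Bool) :
    funcAltGo cs prev res flag = res + (pvCnt cs : Int) + (if (flag || pvHp cs prev) then 1 else 0) := by
  fun_induction funcAltGo cs prev res flag with
  | case1 rest prev res flag ih =>
      simp [pvCnt, pvHp, ih]; ring
  | case2 c rest prev res flag h1 ih =>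
      simp only [pvCnt, pvHp, ih]
      rw [Bool.or_assoc]
  | case3 prev res flag => simp [pvCnt, pvHp]

theorem countGo_eq (fuel : Nat) (l : List Char) (acc : Nat) (h : l.length ≤ fuel) :
    PySem.Chars.count.go ['V','K'] fuel l acc = acc + pvCnt l := by
  induction l using pvCnt.induct generalizing fuel acc with
  | case1 r ih =>
      obtain ⟨n, rfl⟩ : ∃ n, fuel = n + 1 := ⟨fuel - 1, by simp at h; omega⟩
      rw [show PySem.Chars.count.go ['V','K'] (n+1) ('V'::'K'::r) acc
            = PySem.Chars.count.go ['V','K'] n r (acc+1) from by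
        simp [PySem.Chars.count.go, List.isPrefixOf]]
      rw [ih n (acc+1) (by simp at h; omega)]
      simp [pvCnt]; omega
  | case2 a r h1 ih =>
      obtain ⟨n, rfl⟩ : ∃ n, fuel = n + 1 := ⟨fuel - 1, by simp at h; omega⟩
      have hpre : List.isPrefixOf ['V','K'] (a :: r) = false := by
        cases r with
        | nil => simp [List.isPrefixOf]
        | cons b t =>
            simp [List.isPrefixOf]
            intro hav hbk
            exact (h1 t hav.symm (by rw [← hbk])).elim
      rw [show PySem.Chars.count.go ['V','K'] (n+1) (a::r) acc
            = PySem.Chars.count.go ['V','K'] n r acc from by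
        simp [PySem.Chars.count.go, hpre]]
      rw [ih n acc (by simp at h; omega)]
      simp [pvCnt]
  | case3 => cases fuel <;> simp [PySem.Chars.count.go, pvCnt]

theorem count_eq_pvCnt (l : List Char) :
    PySem.Chars.count l ['V','K'] = pvCnt l := by
  simp [PySem.Chars.count]
  rw [countGo_eq l.length l 0 le_rfl]; omega

theorem splitGo_eq (fuel : Nat) (l cur : List Char) (acc : List (List Char)) (h : l.length < fuel) :
    PySem.Chars.splitOn.go ['V','K'] fuel l cur acc =
      acc.reverse ++ (cur.reverse ++ (pvSp l).1) :: (pvSp l).2 := by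
  induction l using pvSp.induct generalizing fuel cur acc with
  | case1 r ih =>
      obtain ⟨n, rfl⟩ : ∃ n, fuel = n + 1 := ⟨fuel - 1, by simp at h; omega⟩
      rw [show PySem.Chars.splitOn.go ['V','K'] (n+1) ('V'::'K'::r) cur acc
            = PySem.Chars.splitOn.go ['V','K'] n r [] (cur.reverse :: acc) from by
        simp [PySem.Chars.splitOn.go, List.isPrefixOf]]
      rw [ih n [] (cur.reverse :: acc) (by simp at h; omega)]
      simp [pvSp]
  | case2 c r h1 ih =>
      obtain ⟨n, rfl⟩ : ∃ n, fuel = n + 1 := ⟨fuel - 1, by simp at h; omega⟩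
      have hpre : List.isPrefixOf ['V','K'] (c :: r) = false := by
        cases r with
        | nil => simp [List.isPrefixOf]
        | cons b t =>
            simp [List.isPrefixOf]
            intro hav hbk
            exact (h1 t hav.symm (by rw [← hbk])).elim
      rw [show PySem.Chars.splitOn.go ['V','K'] (n+1) (c::r) cur acc
            = PySem.Chars.splitOn.go ['V','K'] n r (c :: cur) acc from by
        simp [PySem.Chars.splitOn.go, hpre]]
      rw [ih n (c :: cur) acc (by simp at h; omega)]
      simp [pvSp]
  | case3 =>
      obtain ⟨n, rfl⟩ : ∃ n, fuel = n + 1 := ⟨fuel - 1, by simp at h; omega⟩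
      simp [PySem.Chars.splitOn.go, pvSp]

theorem splitOn_eq_pvSp (l : List Char) :
    PySem.Chars.splitOn l ['V','K'] = (pvSp l).1 :: (pvSp l).2 := by
  simp [PySem.Chars.splitOn]
  rw [splitGo_eq l.length.succ l [] [] (Nat.lt_succ_self _)]
  simp

theorem seg_iff_infix (x : List Char) :
    pvSeg x = (PySem.Chars.isIn ['V','V'] x || PySem.Chars.isIn ['K','K'] x) := by
  rw [Bool.eq_iff_iff, Bool.or_eq_true, PySem.Chars.isIn_iff_infix, PySem.Chars.isIn_iff_infix]
  induction x using pvSeg.induct with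
  | case1 a b r ih =>
      simp only [pvSeg, Bool.or_eq_true, Bool.and_eq_true, beq_iff_eq, ih]
      constructor
      · rintro (⟨rfl, (rfl | rfl)⟩ | hv | hk)
        · exact Or.inl (List.infix_cons_iff.mpr (Or.inl (by simp [List.cons_prefix_cons])))
        · exact Or.inr (List.infix_cons_iff.mpr (Or.inl (by simp [List.cons_prefix_cons])))
        · exact Or.inl (List.infix_cons_iff.mpr (Or.inr hv))
        · exact Or.inr (List.infix_cons_iff.mpr (Or.inr hk))
      · rintro (hv | hk)
        · rcases List.infix_cons_iff.mp hv with hpre | hv'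
          · rcases List.cons_prefix_cons.mp hpre with ⟨rfl, hpre2⟩
            rcases List.cons_prefix_cons.mp hpre2 with ⟨rfl, -⟩
            exact Or.inl ⟨rfl, Or.inl rfl⟩
          · exact Or.inr (Or.inl hv')
        · rcases List.infix_cons_iff.mp hk with hpre | hk'
          · rcases List.cons_prefix_cons.mp hpre with ⟨rfl, hpre2⟩
            rcases List.cons_prefix_cons.mp hpre2 with ⟨rfl, -⟩
            exact Or.inl ⟨rfl, Or.inr rfl⟩
          · exact Or.inr (Or.inr hk')
  | case2 x h1 =>
      have h2 : ∀ (u : List Char), u.length = 2 → ¬ u <:+: x := by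
        intro u hu hinf
        have hl := hinf.length_le
        cases x with
        | nil => simp only [List.length_nil] at hl; omega
        | cons a t =>
            cases t with
            | nil => simp only [List.length_cons, List.length_nil] at hl; omega
            | cons b r => exact (h1 a b r rfl).elim
      have hseg : pvSeg x = false := by
        cases x with
        | nil => rfl
        | cons a t =>
            cases t with
            | nil => rfl
            | cons b r => exact (h1 a b r rfl).elim
      simp [hseg, h2 ['V','V'] rfl, h2 ['K','K'] rfl]

theorem hp_eq (cs : List Char) (prev : Option Char) :
    pvHp cs prev = (pvSeg (prev.toList ++ (pvSp cs).1) || ((pvSp cs).2.any pvSeg)) := by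
  fun_induction pvHp cs prev with
  | case1 r prev ih =>
      cases prev <;> simp [pvSp, pvSeg, ih]
  | case2 c r prev h1 ih =>
      cases prev with
      | none => simp [pvSp, ih]
      | some p =>
          simp only [pvSp, ih, Option.toList, List.cons_append, List.nil_append, pvSeg]
          by_cases hpc : p = c
          · subst hpc; simp [Bool.or_assoc]
          · rw [show (p == c) = false from by simp [hpc]]
            simp
            intro h
            exact (hpc h).elim
  | case3 prev => cases prev <;> simp [pvSp, pvSeg]

-- ===== VERDICT (by name: the statement is the Claim_ definition above) =====
theorem func_spec : Claim_equal_func := by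
  intro s _
  unfold Spec_func func func_alt
  simp only [PySem.Str.count, PySem.Str.split?, PySem.Chars.split?,
    show "VK".toList = ['V','K'] from rfl]
  norm_num
  rw [count_eq_pvCnt, splitOn_eq_pvSp, funcAltGo_eq, hp_eq]
  simp only [Function.comp_def, String.toList_ofList,
    show "VV".toList = ['V','V'] from rfl, show "KK".toList = ['K','K'] from rfl,
    ← Bool.or_eq_true, ← seg_iff_infix,
    PySem.List.sum_map_ite_one_zero pvSeg, Option.toList_none, List.nil_append, Bool.false_or]
  have hiff : (0 < (((((pvSp s.toList).1 :: (pvSp s.toList).2).countP pvSeg : Nat)) : Int)) ↔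
      ((pvSeg (pvSp s.toList).1 || (pvSp s.toList).2.any pvSeg) = true) := by
    simp [List.countP_pos_iff, List.any_eq_true]
  simp only [hiff]
  ring
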